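-- pv_equiv track=rewrite | github.com/caparelli-thiago/IA_LCO | Códigos utilizados em aula/hebb_sala.py | aprende
-- ===== SOURCE A (Python) =====
-- def aprende(dados):
-- 	pesos = [0, 0, 0] # W0, W1, b
-- 	for w0, w1, T in dados:
-- 		dw0 = w0 * T
-- 		dw1 = w1 * T
-- 		db = T
-- 		pesos[0] += dw0
-- 		pesos[1] += dw1
-- 		pesos[2] += db
-- 	return pesos
-- ===== SOURCE B (Python) =====
-- def aprende(dados):
--     dados = list(dados)
--
--     def vsum(lo, hi):
--         # elementwise sum of the delta vectors [w0*T, w1*T, T] of dados[lo:hi]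
--         if hi - lo == 0:
--             return [0, 0, 0]
--         if hi - lo == 1:
--             w0, w1, T = dados[lo]
--             return [w0 * T, w1 * T, T]
--         mid = (lo + hi) // 2
--         l = vsum(lo, mid)
--         r = vsum(mid, hi)
--         return [l[0] + r[0], l[1] + r[1], l[2] + r[2]]
--
--     return vsum(0, len(dados))
-- ===== Notes on version B (the rewrite author's own statement) =====
-- stated objective: alternative
-- what changed: Replaces A's single sequential accumulator loop with a divide-and-conquer reduction: each sample maps to a delta vector [w0*T, w1*T, T] and index halves are combined recursively by elementwise vector addition.
import Mathlib
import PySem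

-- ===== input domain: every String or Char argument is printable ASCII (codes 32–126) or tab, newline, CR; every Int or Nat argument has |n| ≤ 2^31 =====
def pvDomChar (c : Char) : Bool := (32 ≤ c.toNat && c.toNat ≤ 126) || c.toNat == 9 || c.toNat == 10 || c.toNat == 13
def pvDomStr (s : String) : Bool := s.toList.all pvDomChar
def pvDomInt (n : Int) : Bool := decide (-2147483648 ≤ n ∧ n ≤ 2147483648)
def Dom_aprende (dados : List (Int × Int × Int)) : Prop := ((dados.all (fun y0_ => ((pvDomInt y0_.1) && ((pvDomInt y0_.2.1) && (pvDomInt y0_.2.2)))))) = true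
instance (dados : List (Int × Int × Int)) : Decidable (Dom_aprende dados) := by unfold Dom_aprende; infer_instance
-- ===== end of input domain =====

-- B replaces A's sequential accumulator loop with a divide-and-conquer reduction of per-sample
-- delta vectors combined by elementwise vector addition (objective: alternative).

-- ===== PORT A =====
-- A: one loop threading a 3-element weight accumulator.
def aprende (dados : List (Int × Int × Int)) : List Int :=
  let pesos :=
    dados.foldl (fun pesos t =>
      match t with
      | (w0, w1, T) =>
        let dw0 := w0 * T
        let dw1 := w1 * T
        let db := T
        (pesos.1 + dw0, pesos.2.1 + dw1, pesos.2.2 + db))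
      ((0 : Int), (0 : Int), (0 : Int))
  [pesos.1, pesos.2.1, pesos.2.2]

-- ===== PORT B =====
-- B's helper vsum: divide-and-conquer over the index range [lo, hi).
-- dados[lo] is ported with getD: every call B makes has lo < dados.length, so the default is never read.
def aprende_vsum (dados : List (Int × Int × Int)) (lo hi : Nat) : List Int :=
  if hi - lo = 0 then [0, 0, 0]
  else if hi - lo = 1 then
    let t := dados.getD lo ((0 : Int), (0 : Int), (0 : Int))
    [t.1 * t.2.2, t.2.1 * t.2.2, t.2.2]
  else
    let mid := (lo + hi) / 2
    let l := aprende_vsum dados lo mid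
    let r := aprende_vsum dados mid hi
    [l.getD 0 0 + r.getD 0 0, l.getD 1 0 + r.getD 1 0, l.getD 2 0 + r.getD 2 0]
termination_by hi - lo
decreasing_by all_goals omega

def aprende_alt (dados : List (Int × Int × Int)) : List Int :=
  aprende_vsum dados 0 dados.length

-- ===== PRECONDITION & SPEC =====
def Spec_aprende (dados : List (Int × Int × Int)) (out : List Int) : Prop := out = aprende_alt dados
instance (dados : List (Int × Int × Int)) (out : List Int) : Decidable (Spec_aprende dados out) := by unfold Spec_aprende; infer_instance

-- ===== CLAIM (what is proved, stated in full; the proofs are below) =====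
def Claim_equal_aprende : Prop := ∀ (dados : List (Int × Int × Int)), Dom_aprende dados → Spec_aprende dados (aprende dados)

-- ===== LEMMAS AND PROOFS =====
-- the three component sums over a segment
def pvSeg (dados : List (Int × Int × Int)) (lo hi : Nat) : List (Int × Int × Int) :=
  (dados.drop lo).take (hi - lo)

theorem vsum_eq (dados : List (Int × Int × Int)) :
    ∀ n lo hi, hi - lo = n → hi ≤ dados.length →
    aprende_vsum dados lo hi =
      [((pvSeg dados lo hi).map (fun t => t.1 * t.2.2)).sum,
       ((pvSeg dados lo hi).map (fun t => t.2.1 * t.2.2)).sum,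
       ((pvSeg dados lo hi).map (fun t => t.2.2)).sum] := by
  intro n
  induction n using Nat.strong_induction_on with
  | _ n ih =>
    intro lo hi hn hle
    match n, hn with
    | 0, hn =>
      rw [aprende_vsum]
      simp [hn, pvSeg]
    | 1, hn =>
      rw [aprende_vsum]
      have hlt : lo < dados.length := by omega
      have hseg : pvSeg dados lo hi = [dados.getD lo ((0:Int),(0:Int),(0:Int))] := by
        unfold pvSeg
        rw [hn]
        rcases List.exists_of_length_succ _ (show (dados.drop lo).length = ((dados.drop lo).length - 1) + 1 by simp; omega) with ⟨a, tl, hcons⟩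
        simp [hcons]
        have hget : dados[lo]? = some a := by
          have : (dados.drop lo)[0]? = dados[lo + 0]? := List.getElem?_drop
          simp [hcons] at this
          exact this.symm
        simp [hget]
      simp [hn, hseg]
    | (k+2), hn =>
      rw [aprende_vsum]
      have h2 : ¬ (hi - lo = 0) := by omega
      have h1 : ¬ (hi - lo = 1) := by omega
      simp only [h2, h1, if_false]
      set mid := (lo + hi) / 2 with hmid
      have hm1 : mid - lo < k + 2 := by omega
      have hm2 : hi - mid < k + 2 := by omega
      have hl := ih (mid - lo) hm1 lo mid rfl (by omega)
      have hr := ih (hi - mid) hm2 mid hi rfl hle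
      have hsplit : pvSeg dados lo hi = pvSeg dados lo mid ++ pvSeg dados mid hi := by
        unfold pvSeg
        have hd : dados.drop mid = (dados.drop lo).drop (mid - lo) := by
          rw [List.drop_drop]; congr 1; omega
        rw [hd, show hi - lo = (mid - lo) + (hi - mid) by omega, List.take_add]
      rw [hl, hr, hsplit]
      simp

-- ===== VERDICT (by name: the statement is the Claim_ definition above) =====
theorem aprende_spec : Claim_equal_aprende := by
  intro dados _
  unfold Spec_aprende aprende aprende_alt
  rw [vsum_eq dados (dados.length - 0) 0 dados.length rfl (le_refl _)]
  have hseg : pvSeg dados 0 dados.length = dados := by simp [pvSeg]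
  rw [hseg]
  have inv : ∀ (l : List (Int × Int × Int)) (a b c : Int),
      l.foldl (fun pesos t =>
        match t with
        | (w0, w1, T) =>
          let dw0 := w0 * T
          let dw1 := w1 * T
          let db := T
          (pesos.1 + dw0, pesos.2.1 + dw1, pesos.2.2 + db)) (a, b, c)
      = (a + (l.map (fun t => t.1 * t.2.2)).sum,
         b + (l.map (fun t => t.2.1 * t.2.2)).sum,
         c + (l.map (fun t => t.2.2)).sum) := by
    intro l
    induction l with
    | nil => simp
    | cons hd tl ihl =>
      obtain ⟨w0, w1, T⟩ := hd
      intro a b c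
      simp [List.foldl, ihl, List.sum_cons]
      refine ⟨by ring, by ring, by ring⟩
  simp [inv]
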